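-- pv_equiv track=rewrite | github.com/splicemachine/ml-workflow | bobby/src/handlers/base_handler.py | _format_html_exception
-- ===== SOURCE A (Python) =====
-- def _format_html_exception(traceback: str) -> str:
--     """
--     Turn a Python string into HTML so that it can be rendered in the deployment GUI
--
--     :param traceback: string to format for the GUI
--     :returns: string in HTML pre-formatted code-block format
--
--     """
--     # what we need to change in order to get formatted HTML <pre>
--     replacements: dict = {
--         '\n': '<br>',
--         "'": ""
--     }
--     for subject, target in replacements.items():
--         traceback: str = traceback.replace(subject, target)
--
--     return f'<br>{traceback}'
-- ===== SOURCE B (Python) =====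
-- def _format_html_exception(traceback: str) -> str:
--     return '<br>' + ''.join(
--         '<br>' if ch == '\n' else '' if ch == "'" else ch
--         for ch in traceback
--     )
-- ===== Notes on version B (the rewrite author's own statement) =====
-- stated objective: idiomatic
-- what changed: A rebuilds the whole string twice (one .replace pass per substitution); B makes a single left-to-right pass mapping each character to its replacement piece and joins once.
import Mathlib
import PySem

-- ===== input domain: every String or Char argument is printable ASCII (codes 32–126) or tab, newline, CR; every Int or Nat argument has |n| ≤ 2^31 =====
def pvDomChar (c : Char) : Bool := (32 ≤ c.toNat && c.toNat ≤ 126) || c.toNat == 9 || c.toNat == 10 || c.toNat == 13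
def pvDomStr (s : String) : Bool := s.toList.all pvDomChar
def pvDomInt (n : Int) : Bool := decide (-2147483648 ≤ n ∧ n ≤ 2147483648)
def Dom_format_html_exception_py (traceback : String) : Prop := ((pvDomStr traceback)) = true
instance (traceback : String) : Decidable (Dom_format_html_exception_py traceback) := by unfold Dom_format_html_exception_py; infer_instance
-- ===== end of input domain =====

-- B replaces A's sequence of two whole-string .replace passes by a single per-character
-- pass joined once; same return value, objective: idiomatic single pass.

-- ===== PORT A =====
def format_html_exception_py (traceback : String) : String :=
  -- replacements: dict = {'\n': '<br>', "'": ""}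
  let replacements : PySem.Dict String String :=
    (PySem.Dict.empty.insert "\n" "<br>").insert "'" ""
  -- for subject, target in replacements.items(): traceback = traceback.replace(subject, target)
  let traceback := replacements.items.foldl
    (fun t (p : String × String) => PySem.Str.replace t p.1 p.2) traceback
  "<br>" ++ traceback

-- ===== PORT B =====
-- the per-character piece: '<br>' if ch == '\n' else '' if ch == "'" else ch
def pvPiece (ch : Char) : String :=
  if ch = '\n' then "<br>" else if ch = '\'' then "" else String.ofList [ch]

def format_html_exception_py_alt (traceback : String) : String :=
  "<br>" ++ PySem.Str.join "" (traceback.toList.map pvPiece)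

-- ===== PRECONDITION & SPEC =====
def Spec_format_html_exception_py (traceback : String) (out : String) : Prop := out = format_html_exception_py_alt traceback
instance (traceback : String) (out : String) : Decidable (Spec_format_html_exception_py traceback out) := by unfold Spec_format_html_exception_py; infer_instance

-- ===== CLAIM (what is proved, stated in full; the proofs are below) =====
def Claim_equal_format_html_exception_py : Prop := ∀ (traceback : String), Dom_format_html_exception_py traceback → Spec_format_html_exception_py traceback (format_html_exception_py traceback)

-- ===== LEMMAS AND PROOFS =====

-- replace with a single-character pattern is a flatMap over the characters
theorem replace_go_single (o : Char) (new : List Char) :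
    ∀ (fuel : Nat) (l acc : List Char), l.length ≤ fuel →
      PySem.Chars.replace.go [o] new fuel l acc
        = acc.reverse ++ l.flatMap (fun c => if c = o then new else [c]) := by
  intro fuel
  induction fuel with
  | zero =>
    intro l acc h
    have : l = [] := List.length_eq_zero_iff.mp (Nat.le_zero.mp h)
    subst this
    simp [PySem.Chars.replace.go]
  | succ n ih =>
    intro l acc h
    cases l with
    | nil => simp [PySem.Chars.replace.go]
    | cons c t =>
      simp only [PySem.Chars.replace.go]
      by_cases hc : c = o
      · subst hc
        have hpre : List.isPrefixOf [c] (c :: t) = true := by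
          simp [List.isPrefixOf]
        rw [if_pos hpre]
        rw [ih _ _ (by simpa using Nat.le_of_succ_le_succ h)]
        simp
      · have hpre : List.isPrefixOf [o] (c :: t) = false := by
          simp [List.isPrefixOf]
          exact fun he => absurd he.symm hc
        rw [if_neg (by simp [hpre])]
        rw [ih _ _ (by simpa using Nat.le_of_succ_le_succ h)]
        simp [hc]

theorem replace_single (s : List Char) (o : Char) (new : List Char) :
    PySem.Chars.replace s [o] new = s.flatMap (fun c => if c = o then new else [c]) := by
  simp only [PySem.Chars.replace, List.isEmpty]
  rw [replace_go_single o new s.length s [] (Nat.le_refl _)]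
  simp

theorem join_empty_sep (l : List (List Char)) :
    PySem.Chars.join [] l = l.flatten := by
  unfold PySem.Chars.join
  induction l with
  | nil => simp [List.intercalate]
  | cons a t ih =>
    cases t with
    | nil => simp [List.intercalate]
    | cons b u =>
      simp only [List.intercalate, List.intersperse] at ih ⊢
      simp at ih
      simp [ih]

-- ===== VERDICT (by name: the statement is the Claim_ definition above) =====
theorem A_eval (t : String) :
    format_html_exception_py t
      = "<br>" ++ PySem.Str.replace (PySem.Str.replace t "\n" "<br>") "\'" "" := by
  rfl

theorem format_html_exception_py_spec : Claim_equal_format_html_exception_py := by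
  intro t _
  unfold Spec_format_html_exception_py format_html_exception_py_alt
  rw [A_eval]
  apply congrArg (fun s => "<br>" ++ s)
  apply String.toList_inj.mp
  rw [PySem.Str.toList_join]
  have h1 : ("\n" : String).toList = ['\n'] := by decide
  have h2 : ("\'" : String).toList = ['\''] := by decide
  rw [PySem.Str.toList_replace, PySem.Str.toList_replace, h1, h2]
  rw [replace_single, replace_single, List.flatMap_assoc]
  have hjoin : ("" : String).toList = ([] : List Char) := by decide
  rw [hjoin, join_empty_sep]
  rw [List.map_map, ← List.flatMap_def]
  have hfun : (fun c => (if c = '\n' then "<br>".toList else [c]).flatMap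
        (fun c => if c = '\'' then [] else [c]))
      = fun c => (String.toList ∘ pvPiece) c := by
    funext c
    by_cases hn : c = '\n'
    · subst hn; decide
    · by_cases hq : c = '\''
      · subst hq; decide
      · simp [pvPiece, hn, hq, Function.comp]
  rw [hfun]
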